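-- pv_equiv track=rewrite | github.com/AndyScherrenberg/AoC | 2023/04.py | calculate_win
-- ===== SOURCE A (Python) =====
-- def calculate_win(numbers, win):
--     result = 0
--     for n in numbers:
--         if (n.isdigit()):
--             if n in win:
--                 if (result == 0):
--                     result = 1
--                 else:
--                     result *=2
--     return result
-- ===== SOURCE B (Python) =====
-- def calculate_win(numbers, win):
--     count = sum(1 for n in numbers if n.isdigit() and n in win)
--     return 2 ** (count - 1) if count else 0
-- ===== Notes on version B (the rewrite author's own statement) =====
-- stated objective: simpler
-- what changed: Replaced the 0->1->double accumulator loop with a single counting pass followed by the closed form 2**(count-1) (0 when count is 0).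
import Mathlib
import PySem

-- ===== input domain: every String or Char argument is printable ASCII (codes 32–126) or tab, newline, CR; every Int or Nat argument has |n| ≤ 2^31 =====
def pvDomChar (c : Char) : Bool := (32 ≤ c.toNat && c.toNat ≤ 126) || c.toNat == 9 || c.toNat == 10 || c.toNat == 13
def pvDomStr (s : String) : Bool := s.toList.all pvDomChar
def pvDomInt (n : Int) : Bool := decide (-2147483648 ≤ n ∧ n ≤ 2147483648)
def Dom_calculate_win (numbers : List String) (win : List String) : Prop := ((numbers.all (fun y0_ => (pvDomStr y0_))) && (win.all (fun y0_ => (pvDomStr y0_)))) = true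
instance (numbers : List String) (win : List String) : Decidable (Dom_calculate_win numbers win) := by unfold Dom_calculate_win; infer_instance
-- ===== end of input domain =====

-- B replaces A's 0->1->double accumulator with a counting pass plus the closed form 2^(count-1) (simpler decomposition).


-- ===== PORT A =====
def calculate_win (numbers : List String) (win : List String) : Int :=
  numbers.foldl (fun result n =>
    if PySem.Str.strIsdigit n then
      if win.contains n then
        if result = 0 then 1 else result * 2
      else result
    else result) 0

-- ===== PORT B =====
def calculate_win_alt (numbers : List String) (win : List String) : Int :=
  let count : Nat := (numbers.filter (fun n => PySem.Str.strIsdigit n && win.contains n)).length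
  if count ≠ 0 then 2 ^ (count - 1) else 0

-- ===== PRECONDITION & SPEC =====
def Spec_calculate_win (numbers : List String) (win : List String) (out : Int) : Prop := out = calculate_win_alt numbers win
instance (numbers : List String) (win : List String) (out : Int) : Decidable (Spec_calculate_win numbers win out) := by unfold Spec_calculate_win; infer_instance

-- ===== CLAIM (what is proved, stated in full; the proofs are below) =====
def Claim_equal_calculate_win : Prop := ∀ (numbers : List String) (win : List String), Dom_calculate_win numbers win → Spec_calculate_win numbers win (calculate_win numbers win)

-- ===== LEMMAS AND PROOFS =====

-- A's loop started from a positive power of two multiplies by 2 once per match.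
theorem foldA_pos (win : List String) (numbers : List String) (r : Int) (hr : r ≠ 0) :
    numbers.foldl (fun result n =>
      if PySem.Str.strIsdigit n then
        if win.contains n then
          if result = 0 then 1 else result * 2
        else result
      else result) r
    = r * 2 ^ (numbers.filter (fun n => PySem.Str.strIsdigit n && win.contains n)).length := by
  induction numbers generalizing r with
  | nil => simp
  | cons x xs ih =>
    simp only [List.foldl_cons, List.filter_cons]
    by_cases hd : PySem.Str.strIsdigit x
    · by_cases hw : win.contains x
      · simp only [hd, hw, if_pos, Bool.and_self, if_neg hr]
        rw [ih (r * 2) (by exact mul_ne_zero hr two_ne_zero)]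
        simp [pow_succ]; ring
      · rw [if_pos hd, if_neg hw, if_neg (show ¬ ((PySem.Str.strIsdigit x && win.contains x) = true) by rw [Bool.and_eq_true]; exact fun h => hw h.2)]
        exact ih r hr
    · rw [if_neg hd, if_neg (show ¬ ((PySem.Str.strIsdigit x && win.contains x) = true) by rw [Bool.and_eq_true]; exact fun h => hd h.1)]
      exact ih r hr

theorem foldA_zero (win : List String) (numbers : List String) :
    numbers.foldl (fun result n =>
      if PySem.Str.strIsdigit n then
        if win.contains n then
          if result = 0 then 1 else result * 2
        else result
      else result) 0
    = (let count := (numbers.filter (fun n => PySem.Str.strIsdigit n && win.contains n)).length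
       if count ≠ 0 then (2 : Int) ^ (count - 1) else 0) := by
  induction numbers with
  | nil => simp
  | cons x xs ih =>
    simp only [List.foldl_cons, List.filter_cons]
    by_cases hd : PySem.Str.strIsdigit x
    · by_cases hw : win.contains x
      · simp only [hd, hw, Bool.and_self, if_pos]
        rw [foldA_pos win xs 1 one_ne_zero]
        simp
      · rw [if_pos hd, if_neg hw, if_neg (show ¬ ((PySem.Str.strIsdigit x && win.contains x) = true) by rw [Bool.and_eq_true]; exact fun h => hw h.2)]
        exact ih
    · rw [if_neg hd, if_neg (show ¬ ((PySem.Str.strIsdigit x && win.contains x) = true) by rw [Bool.and_eq_true]; exact fun h => hd h.1)]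
      exact ih

-- ===== VERDICT (by name: the statement is the Claim_ definition above) =====
theorem calculate_win_spec : Claim_equal_calculate_win := by
  intro numbers win _
  unfold Spec_calculate_win calculate_win calculate_win_alt
  exact foldA_zero win numbers
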